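-- pv_equiv track=rewrite | github.com/FSLART/eufs_sim | eufs_launcher/src/eufs_launcher/TrackGenerator.py | check_if_overlap
-- ===== SOURCE A (Python) =====
-- def check_if_overlap(points):
-- 	#Naive check to see if track overlaps itself - we remove duplicates from the list and check if size changes
-- 	#(Won't catch overlaps due to track width, only if track center overlaps)
-- 	points = points[:-10] #remove end points as in theory that should also be the start point
-- 	#(I remove extra to be a little generous to it as a courtesy - I don't really care how well the
-- 	#start loops to the end yet)
--
-- 	#We want to add in the diagonally-connected points, otherwise you can imagine
-- 	#that two tracks moving diagonally opposite could cross eachother inbetween the pixels,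
-- 	#fooling our test.
-- 	for index in range(1,len(points)):
-- 		(sx,sy) = points[index-1]
-- 		(ex,ey) = points[index]
-- 		manhattan_distance = abs(ex-sx)+abs(ey-sy)
-- 		if (manhattan_distance > 1):
-- 			#moved diagonally, insert an extra point for it at the end!
-- 			points.append( (sx+1,sy) if ex > sx else (sx-1,sy) )
--
-- 	return len(set(points)) != len(points)
-- ===== SOURCE B (Python) =====
-- def check_if_overlap(points):
-- 	# Same overlap test, different shape: collect diagonal "bridge" points in one
-- 	# comprehension over adjacent pairs, then detect duplicates by sort-then-scan
-- 	# of adjacent elements instead of comparing set and list sizes.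
-- 	pts = points[:-10]
-- 	bridges = [(sx + 1, sy) if ex > sx else (sx - 1, sy)
-- 	           for (sx, sy), (ex, ey) in zip(pts, pts[1:])
-- 	           if abs(ex - sx) + abs(ey - sy) > 1]
-- 	allpts = sorted(pts + bridges)
-- 	return any(a == b for a, b in zip(allpts, allpts[1:]))
-- ===== Notes on version B (the rewrite author's own statement) =====
-- stated objective: alternative
-- what changed: The index loop that appends bridge points to the growing list is replaced by a comprehension over zipped adjacent pairs, and the set-size-vs-list-size duplicate test is replaced by sort-then-scan for an equal adjacent pair.
import Mathlib
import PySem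

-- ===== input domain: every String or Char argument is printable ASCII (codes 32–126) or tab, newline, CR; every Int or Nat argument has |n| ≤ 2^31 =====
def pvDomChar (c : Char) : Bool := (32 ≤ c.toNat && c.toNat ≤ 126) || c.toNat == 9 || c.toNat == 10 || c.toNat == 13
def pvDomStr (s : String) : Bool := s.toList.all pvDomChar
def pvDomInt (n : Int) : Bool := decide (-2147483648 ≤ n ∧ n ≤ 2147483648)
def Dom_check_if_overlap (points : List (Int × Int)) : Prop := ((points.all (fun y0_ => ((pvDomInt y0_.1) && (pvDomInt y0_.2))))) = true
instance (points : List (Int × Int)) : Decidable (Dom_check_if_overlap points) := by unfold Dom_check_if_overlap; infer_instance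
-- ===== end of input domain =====

-- B replaces A's index loop with a comprehension over zipped adjacent pairs and the
-- set-size duplicate test with sort-then-scan; same boolean on every input (alternative, not faster).

-- ===== PORT A =====
-- points = points[:-10]; for index in range(1, len(points)): ... points.append(...)  (range end
-- evaluated once, so appended points are never re-visited); return len(set(points)) != len(points)
def check_if_overlap (points : List (Int × Int)) : Bool :=
  let pts0 := PySem.List.slice points none (some (-10))
  let pts := (PySem.List.pyRange 1 (pts0.length : Int) 1).foldl
    (fun acc index =>
      let s := PySem.List.pyGetD acc (index - 1) (0, 0)
      let e := PySem.List.pyGetD acc index (0, 0)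
      if 1 < (e.1 - s.1).natAbs + (e.2 - s.2).natAbs then
        acc ++ [if s.1 < e.1 then (s.1 + 1, s.2) else (s.1 - 1, s.2)]
      else acc) pts0
  decide (PySem.Set.len (PySem.Set.ofList pts) ≠ pts.length)


-- ===== PORT B =====
-- bridges = [(sx+1,sy) if ex>sx else (sx-1,sy) for (sx,sy),(ex,ey) in zip(pts,pts[1:]) if abs(ex-sx)+abs(ey-sy)>1]
def pvBridges (pts : List (Int × Int)) : List (Int × Int) :=
  (pts.zip pts.tail).filterMap (fun se =>
    if 1 < (se.2.1 - se.1.1).natAbs + (se.2.2 - se.1.2).natAbs then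
      some (if se.1.1 < se.2.1 then (se.1.1 + 1, se.1.2) else (se.1.1 - 1, se.1.2))
    else none)


-- allpts = sorted(pts + bridges)  (Python tuple order = lexicographic, hence sorted2 fst snd);
-- return any(a == b for a, b in zip(allpts, allpts[1:]))
def check_if_overlap_alt (points : List (Int × Int)) : Bool :=
  let pts := PySem.List.slice points none (some (-10))
  let allpts := PySem.List.sorted2 (pts ++ pvBridges pts) Prod.fst Prod.snd
  (allpts.zip allpts.tail).any (fun ab => ab.1 == ab.2)


-- ===== PRECONDITION & SPEC =====
def Spec_check_if_overlap (points : List (Int × Int)) (out : Bool) : Prop := out = check_if_overlap_alt points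
instance (points : List (Int × Int)) (out : Bool) : Decidable (Spec_check_if_overlap points out) := by unfold Spec_check_if_overlap; infer_instance

-- ===== CLAIM (what is proved, stated in full; the proofs are below) =====
def Claim_equal_check_if_overlap : Prop := ∀ (points : List (Int × Int)), Dom_check_if_overlap points → Spec_check_if_overlap points (check_if_overlap points)

-- ===== LEMMAS AND PROOFS =====
theorem pvBridges_cons (a b : Int × Int) (t : List (Int × Int)) :
    pvBridges (a :: b :: t) =
      (if 1 < (b.1 - a.1).natAbs + (b.2 - a.2).natAbs then
        [if a.1 < b.1 then (a.1 + 1, a.2) else (a.1 - 1, a.2)] else []) ++ pvBridges (b :: t) := by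
  by_cases hc : 1 < (b.1 - a.1).natAbs + (b.2 - a.2).natAbs <;>
    simp [pvBridges, hc]

theorem pvBridges_short (l : List (Int × Int)) (h : l.length ≤ 1) : pvBridges l = [] := by
  match l, h with
  | [], _ => rfl
  | [a], _ => rfl

-- sorted2 on pairs is sorted by the lexicographic key
theorem pv_sorted2_eq (xs : List (Int × Int)) :
    PySem.List.sorted2 xs Prod.fst Prod.snd false
      = PySem.List.sorted xs (fun p => toLex p) false := by
  have hfun : (fun (a b : Int × Int) => decide (a.1 < b.1) || (!decide (b.1 < a.1) && decide (a.2 < b.2)))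
      = (fun (a b : Int × Int) => decide ((fun p => toLex p) a < (fun p => toLex p) b)) := by
    funext a b
    rcases a with ⟨a1, a2⟩; rcases b with ⟨b1, b2⟩
    by_cases h1 : a1 < b1 <;> by_cases h2 : b1 < a1 <;> by_cases h3 : a2 < b2 <;>
      simp [h1, h2, h3, Prod.Lex.toLex_lt_toLex] <;> omega
  show List.foldl (fun acc x => PySem.List.insertBy (fun (a b : Int × Int) => decide (a.1 < b.1) || (!decide (b.1 < a.1) && decide (a.2 < b.2))) x acc) [] xs
      = List.foldl (fun acc x => PySem.List.insertBy (fun (a b : Int × Int) => decide ((fun p => toLex p) a < (fun p => toLex p) b)) x acc) [] xs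
  rw [hfun]

theorem pv_anyAdj_iff (l : List (Int × Int))
    (hp : l.Pairwise (fun a b => toLex a ≤ toLex b)) :
    ((l.zip l.tail).any (fun ab => ab.1 == ab.2) = true) ↔ ¬ l.Nodup := by
  induction l with
  | nil => simp
  | cons a t ih =>
    match t with
    | [] => simp
    | b :: t' =>
      rcases List.pairwise_cons.mp hp with ⟨ha, hp'⟩
      by_cases hab : a = b
      · subst hab
        simp [List.nodup_cons]
      · have : (a == b) = false := by simp [hab]
        simp only [List.tail_cons] at ih
        simp only [List.tail_cons, List.zip_cons_cons, List.any_cons, this, Bool.false_or]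
        rw [ih hp']
        constructor
        · intro h hn; exact h hn.of_cons
        · intro h
          by_cases hnd : (b :: t').Nodup
          · exfalso
            apply h
            rw [List.nodup_cons]
            refine ⟨?_, hnd⟩
            intro hmem
            rcases List.mem_cons.mp hmem with rfl | hmem
            · exact hab rfl
            · have h1 : toLex a ≤ toLex b := ha b (List.mem_cons_self ..)
              have h2 : toLex b ≤ toLex a :=
                (List.pairwise_cons.mp hp').1 a hmem
              have : toLex a = toLex b := le_antisymm h1 h2
              exact hab (toLex.injective this)
          · exact hnd

theorem pv_ofList_len_iff (xs : List (Int × Int)) :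
    (PySem.Set.ofList xs).length = xs.length ↔ xs.Nodup := by
  constructor
  · intro h
    have hperm : (PySem.Set.ofList xs).Perm xs.dedup := by
      rw [List.perm_ext_iff_of_nodup (PySem.Set.nodup_ofList xs) (List.nodup_dedup xs)]
      intro a
      rw [PySem.Set.mem_ofList, List.mem_dedup]
    have hlen : xs.dedup.length = xs.length := by rw [← hperm.length_eq, h]
    have heq : xs.dedup = xs := (List.dedup_sublist xs).eq_of_length hlen
    rw [← heq]; exact List.nodup_dedup xs
  · intro h
    rw [PySem.Set.ofList_eq_self_of_nodup xs h]

theorem pv_loopA (base : List (Int × Int)) :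
    ∀ (fuel k : Nat) (extra : List (Int × Int)), base.length ≤ k + 1 + fuel →
    (PySem.List.pyRange ((k : Int) + 1) (base.length : Int) 1).foldl
      (fun acc index =>
        let s := PySem.List.pyGetD acc (index - 1) (0, 0)
        let e := PySem.List.pyGetD acc index (0, 0)
        if 1 < (e.1 - s.1).natAbs + (e.2 - s.2).natAbs then
          acc ++ [if s.1 < e.1 then (s.1 + 1, s.2) else (s.1 - 1, s.2)]
        else acc) (base ++ extra)
    = base ++ extra ++ pvBridges (base.drop k) := by
  intro fuel
  induction fuel with
  | zero =>
    intro k extra hle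
    rw [PySem.List.pyRange_one_eq_nil (by exact_mod_cast by omega)]
    rw [pvBridges_short _ (by simp; omega)]
    simp
  | succ fuel ih =>
    intro k extra hle
    by_cases hk : base.length ≤ k + 1
    · rw [PySem.List.pyRange_one_eq_nil (by exact_mod_cast hk)]
      rw [pvBridges_short _ (by simp; omega)]
      simp
    · have hk1 : k + 1 < base.length := by omega
      rw [PySem.List.pyRange_one_cons (by exact_mod_cast hk1)]
      simp only [List.foldl_cons]
      have hk0 : k < base.length := by omega
      have hs : PySem.List.pyGetD (base ++ extra) ((k : Int) + 1 - 1) (0, 0) = base[k] := by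
        have : (k : Int) + 1 - 1 = ((k : Nat) : Int) := by ring
        rw [this, PySem.List.pyGetD_natCast, List.getD_append _ _ _ _ hk0,
          List.getD_eq_getElem _ _ hk0]
      have he : PySem.List.pyGetD (base ++ extra) ((k : Int) + 1) (0, 0) = base[k + 1] := by
        have : (k : Int) + 1 = (((k + 1 : Nat)) : Int) := by push_cast; ring
        rw [this, PySem.List.pyGetD_natCast, List.getD_append _ _ _ _ hk1,
          List.getD_eq_getElem _ _ hk1]
      simp only [hs, he]
      set optk : List (Int × Int) :=
        if 1 < (base[k + 1].1 - base[k].1).natAbs + (base[k + 1].2 - base[k].2).natAbs then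
          [if base[k].1 < base[k + 1].1 then (base[k].1 + 1, base[k].2)
           else (base[k].1 - 1, base[k].2)]
        else [] with hoptk
    -- one loop step appends optk
      have hstep :
          (if 1 < (base[k + 1].1 - base[k].1).natAbs + (base[k + 1].2 - base[k].2).natAbs then
            (base ++ extra) ++ [if base[k].1 < base[k + 1].1 then (base[k].1 + 1, base[k].2)
              else (base[k].1 - 1, base[k].2)]
          else base ++ extra) = base ++ (extra ++ optk) := by
        rw [hoptk]; split <;> simp
      rw [hstep]
      have harg : (k : Int) + 1 + 1 = ((k + 1 : Nat) : Int) + 1 := by push_cast; ring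
      rw [harg, ih (k + 1) (extra ++ optk) (by omega)]
      have hdrop : base.drop k = base[k] :: base[k + 1] :: base.drop (k + 2) := by
        rw [List.drop_eq_getElem_cons hk0, List.drop_eq_getElem_cons hk1]
      have hdrop1 : base.drop (k + 1) = base[k + 1] :: base.drop (k + 2) :=
        List.drop_eq_getElem_cons hk1
      rw [hdrop, hdrop1, pvBridges_cons]
      simp [hoptk]


theorem pv_main (points : List (Int × Int)) :
    check_if_overlap points = check_if_overlap_alt points := by
  simp only [check_if_overlap, check_if_overlap_alt]
  set pts0 := PySem.List.slice points none (some (-10)) with hpts0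
  have hloop := pv_loopA pts0 pts0.length 0 [] (by omega)
  simp only [Nat.cast_zero, zero_add, List.append_nil, List.drop_zero] at hloop
  rw [hloop]
  set L := pts0 ++ pvBridges pts0 with hL
  rw [pv_sorted2_eq]
  set s := PySem.List.sorted L (fun p => toLex p) false with hs
  have hpw : s.Pairwise (fun a b => toLex a ≤ toLex b) := PySem.List.sorted_pairwise L _
  have hadj := pv_anyAdj_iff s hpw
  have hnd : s.Nodup ↔ L.Nodup := (PySem.List.sorted_perm L _ false).nodup_iff
  have hlen := pv_ofList_len_iff L
  rw [Bool.eq_iff_iff]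
  simp only [decide_eq_true_eq]
  rw [hadj, hnd]
  have hcast : ((PySem.Set.ofList L).len = (L.length : Int)) ↔ L.Nodup := by
    rw [show (PySem.Set.ofList L).len = ((PySem.Set.ofList L).length : Int) from rfl,
      Int.natCast_inj]
    exact hlen
  exact not_congr hcast

-- ===== VERDICT (by name: the statement is the Claim_ definition above) =====
theorem check_if_overlap_spec : Claim_equal_check_if_overlap := by
  intro points _
  unfold Spec_check_if_overlap
  exact pv_main points
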